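-- pv_equiv track=rewrite | github.com/nkhodr2-blip/fridgeflow | app/main.py | guess_dish
-- ===== SOURCE A (Python) =====
-- from typing import List, Dict
--
-- def guess_dish(ings: List[str]) -> str:
--     has_eggs = any("egg" in i for i in ings)
--     has_pasta = any(k in i for i in ings for k in ["pasta","spaghetti","noodle","penne","macaroni"])
--     has_tortilla = any("tortilla" in i for i in ings)
--     has_spinach = any("spinach" in i for i in ings)
--     has_chicken = any("chicken" in i for i in ings)
--     has_rice = any("rice" in i for i in ings)
--
--     if has_eggs and has_tortilla: return "Quick Egg Wraps"
--     if has_eggs and has_spinach:  return "Spinach & Egg Skillet"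
--     if has_pasta:                 return "Weeknight Pasta"
--     if has_chicken and has_rice:  return "One-Pan Chicken & Rice"
--     if has_chicken:               return "Pan-Seared Chicken Plate"
--     if has_rice:                  return "Fried Rice Remix"
--     return "Simple Weeknight Skillet"
-- ===== SOURCE B (Python) =====
-- # Data-driven rewrite: one pass builds a set of matched keyword tags,
-- # then a priority-ordered rule table is scanned for the first satisfied rule.
-- KEYWORDS = ["egg", "pasta", "spaghetti", "noodle", "penne", "macaroni",
--             "tortilla", "spinach", "chicken", "rice"]
-- PASTA = ["pasta", "spaghetti", "noodle", "penne", "macaroni"]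
-- # each rule: (list of requirement groups, dish); a group is satisfied if ANY
-- # of its keywords was tagged, a rule fires if ALL its groups are satisfied
-- RULES = [
--     ([["egg"], ["tortilla"]], "Quick Egg Wraps"),
--     ([["egg"], ["spinach"]], "Spinach & Egg Skillet"),
--     ([PASTA], "Weeknight Pasta"),
--     ([["chicken"], ["rice"]], "One-Pan Chicken & Rice"),
--     ([["chicken"]], "Pan-Seared Chicken Plate"),
--     ([["rice"]], "Fried Rice Remix"),
-- ]
--
-- def guess_dish(ings):
--     tags = set()
--     for i in ings:
--         for k in KEYWORDS:
--             if k in i: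
--                 tags.add(k)
--     for groups, dish in RULES:
--         if all(any(k in tags for k in g) for g in groups):
--             return dish
--     return "Simple Weeknight Skillet"
-- ===== Notes on version B (the rewrite author's own statement) =====
-- stated objective: alternative
-- what changed: B replaces A's six hardcoded flag scans and if-cascade with a single pass that collects matched keywords into a set, plus a data-driven priority rule table scanned for the first rule whose requirement groups are all covered by the tag set.
import Mathlib
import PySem

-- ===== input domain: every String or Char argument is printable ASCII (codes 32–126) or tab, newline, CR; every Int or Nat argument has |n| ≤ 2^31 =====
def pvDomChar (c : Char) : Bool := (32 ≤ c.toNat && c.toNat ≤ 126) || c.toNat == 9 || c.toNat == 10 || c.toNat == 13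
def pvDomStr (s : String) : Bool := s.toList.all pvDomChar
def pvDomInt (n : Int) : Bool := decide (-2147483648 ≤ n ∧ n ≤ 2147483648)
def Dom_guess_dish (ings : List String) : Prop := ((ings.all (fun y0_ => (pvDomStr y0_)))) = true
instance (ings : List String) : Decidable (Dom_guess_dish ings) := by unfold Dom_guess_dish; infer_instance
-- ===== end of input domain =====

-- B replaces A's six flag scans + hardcoded cascade with a tag set built in one
-- pass and a data-driven priority rule table (alternative decomposition, same value).

-- ===== PORT A =====
def guess_dish (ings : List String) : String :=
  let has_eggs := ings.any (fun i => PySem.Str.isIn "egg" i)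
  let has_pasta := ings.any (fun i =>
    (["pasta", "spaghetti", "noodle", "penne", "macaroni"] : List String).any
      (fun k => PySem.Str.isIn k i))
  let has_tortilla := ings.any (fun i => PySem.Str.isIn "tortilla" i)
  let has_spinach := ings.any (fun i => PySem.Str.isIn "spinach" i)
  let has_chicken := ings.any (fun i => PySem.Str.isIn "chicken" i)
  let has_rice := ings.any (fun i => PySem.Str.isIn "rice" i)
  if has_eggs && has_tortilla then "Quick Egg Wraps"
  else if has_eggs && has_spinach then "Spinach & Egg Skillet"
  else if has_pasta then "Weeknight Pasta"
  else if has_chicken && has_rice then "One-Pan Chicken & Rice"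
  else if has_chicken then "Pan-Seared Chicken Plate"
  else if has_rice then "Fried Rice Remix"
  else "Simple Weeknight Skillet"

-- ===== PORT B =====
def bKeywords : List String :=
  ["egg", "pasta", "spaghetti", "noodle", "penne", "macaroni",
   "tortilla", "spinach", "chicken", "rice"]

def bPasta : List String := ["pasta", "spaghetti", "noodle", "penne", "macaroni"]

-- each rule: (requirement groups, dish); a group is satisfied if any of its
-- keywords is in the tag set, a rule fires if all its groups are satisfied
def bRules : List (List (List String) × String) :=
  [([["egg"], ["tortilla"]], "Quick Egg Wraps"),
   ([["egg"], ["spinach"]], "Spinach & Egg Skillet"),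
   ([bPasta], "Weeknight Pasta"),
   ([["chicken"], ["rice"]], "One-Pan Chicken & Rice"),
   ([["chicken"]], "Pan-Seared Chicken Plate"),
   ([["rice"]], "Fried Rice Remix")]

-- the tag-collecting pass: for i in ings: for k in KEYWORDS: if k in i: tags.add(k)
def bTags (ings : List String) : PySem.Set String :=
  ings.foldl
    (fun tags i => bKeywords.foldl
      (fun tags k => if PySem.Str.isIn k i then PySem.Set.add tags k else tags) tags)
    PySem.Set.empty

-- the rule-table scan: first rule whose groups are all covered, else the default
def bMatch (tags : PySem.Set String) : List (List (List String) × String) → String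
  | [] => "Simple Weeknight Skillet"
  | (groups, dish) :: rest =>
      if groups.all (fun g => g.any (fun k => PySem.Set.contains tags k)) then dish
      else bMatch tags rest

def guess_dish_alt (ings : List String) : String :=
  bMatch (bTags ings) bRules

-- ===== PRECONDITION & SPEC =====
def Spec_guess_dish (ings : List String) (out : String) : Prop := out = guess_dish_alt ings
instance (ings : List String) (out : String) : Decidable (Spec_guess_dish ings out) := by unfold Spec_guess_dish; infer_instance

-- ===== CLAIM (what is proved, stated in full; the proofs are below) =====
def Claim_equal_guess_dish : Prop := ∀ (ings : List String), Dom_guess_dish ings → Spec_guess_dish ings (guess_dish ings)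

-- ===== LEMMAS AND PROOFS =====

-- membership after the inner keyword loop on one ingredient
theorem mem_inner_foldl (l : List String) (s : PySem.Set String) (i k : String) :
    k ∈ l.foldl (fun t k' => if PySem.Str.isIn k' i then PySem.Set.add t k' else t) s ↔
      k ∈ s ∨ (k ∈ l ∧ PySem.Str.isIn k i = true) := by
  induction l generalizing s with
  | nil => simp
  | cons x xs ih =>
    simp only [List.foldl_cons, ih, List.mem_cons]
    split_ifs with h
    · simp only [PySem.Set.mem_add]
      constructor
      · rintro ((hs | rfl) | hl)
        · exact Or.inl hs
        · exact Or.inr ⟨Or.inl rfl, h⟩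
        · exact Or.inr ⟨Or.inr hl.1, hl.2⟩
      · rintro (hs | ⟨rfl | hl, hin⟩)
        · exact Or.inl (Or.inl hs)
        · exact Or.inl (Or.inr rfl)
        · exact Or.inr ⟨hl, hin⟩
    · constructor
      · rintro (hs | hl)
        · exact Or.inl hs
        · exact Or.inr ⟨Or.inr hl.1, hl.2⟩
      · rintro (hs | ⟨rfl | hl, hin⟩)
        · exact Or.inl hs
        · exact absurd hin h
        · exact Or.inr ⟨hl, hin⟩

-- membership in the tag set = keyword matched by some ingredient
theorem mem_bTags (ings : List String) (k : String) :
    k ∈ bTags ings ↔ k ∈ bKeywords ∧ ∃ i ∈ ings, PySem.Str.isIn k i = true := by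
  unfold bTags
  suffices h : ∀ s : PySem.Set String,
      k ∈ ings.foldl (fun tags i => bKeywords.foldl
        (fun t k' => if PySem.Str.isIn k' i then PySem.Set.add t k' else t) tags) s ↔
        k ∈ s ∨ (k ∈ bKeywords ∧ ∃ i ∈ ings, PySem.Str.isIn k i = true) by
    simpa [PySem.Set.empty] using h PySem.Set.empty
  induction ings with
  | nil => simp
  | cons x xs ih =>
    intro s
    simp only [List.foldl_cons, ih, mem_inner_foldl, List.mem_cons]
    constructor
    · rintro ((hs | ⟨hk, hin⟩) | ⟨hk, i, hi, hin⟩)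
      · exact Or.inl hs
      · exact Or.inr ⟨hk, x, Or.inl rfl, hin⟩
      · exact Or.inr ⟨hk, i, Or.inr hi, hin⟩
    · rintro (hs | ⟨hk, i, rfl | hi, hin⟩)
      · exact Or.inl (Or.inl hs)
      · exact Or.inl (Or.inr ⟨hk, hin⟩)
      · exact Or.inr ⟨hk, i, hi, hin⟩

-- tag-set lookup of a listed keyword equals A's scan of ings for it
theorem contains_bTags (ings : List String) (k : String) (hk : k ∈ bKeywords) :
    PySem.Set.contains (bTags ings) k = ings.any (fun i => PySem.Str.isIn k i) := by
  rw [Bool.eq_iff_iff, PySem.Set.contains_iff, mem_bTags, List.any_eq_true]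
  tauto

-- ===== VERDICT (by name: the statement is the Claim_ definition above) =====
theorem guess_dish_spec : Claim_equal_guess_dish := by
  intro ings _
  unfold Spec_guess_dish guess_dish guess_dish_alt bRules
  simp only [bMatch, List.all_cons, List.all_nil, List.any_cons, List.any_nil,
    Bool.or_false, Bool.and_true,
    contains_bTags _ _ (by decide : ("egg" : String) ∈ bKeywords),
    contains_bTags _ _ (by decide : ("tortilla" : String) ∈ bKeywords),
    contains_bTags _ _ (by decide : ("spinach" : String) ∈ bKeywords),
    contains_bTags _ _ (by decide : ("chicken" : String) ∈ bKeywords),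
    contains_bTags _ _ (by decide : ("rice" : String) ∈ bKeywords)]
  have hp : (ings.any fun i => PySem.Str.isIn "pasta" i ||
      (PySem.Str.isIn "spaghetti" i || (PySem.Str.isIn "noodle" i ||
        (PySem.Str.isIn "penne" i || PySem.Str.isIn "macaroni" i)))) =
      bPasta.any (fun k => PySem.Set.contains (bTags ings) k) := by
    simp only [bPasta, List.any_cons, List.any_nil, Bool.or_false,
      contains_bTags _ _ (by decide : ("pasta" : String) ∈ bKeywords),
      contains_bTags _ _ (by decide : ("spaghetti" : String) ∈ bKeywords),
      contains_bTags _ _ (by decide : ("noodle" : String) ∈ bKeywords),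
      contains_bTags _ _ (by decide : ("penne" : String) ∈ bKeywords),
      contains_bTags _ _ (by decide : ("macaroni" : String) ∈ bKeywords)]
    rw [Bool.eq_iff_iff]
    simp only [List.any_eq_true, Bool.or_eq_true]
    aesop
  rw [hp]
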